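-- pv_equiv track=rewrite | github.com/pypi-data/pypi-mirror-404 | packages/holoviz-mcp/holoviz_mcp-0.14.4.tar.gz/holoviz_mcp-0.14.4/src/holoviz_mcp/holoviz_mcp/data.py | find_keyword_matches
-- ===== SOURCE A (Python) =====
-- def find_keyword_matches(content: str, keywords: list[str]) -> list[tuple[int, int, str]]:
--     """Find all positions where keywords appear in content.
--
--     Args:
--         content: Document content to search
--         keywords: List of keywords to find
--
--     Returns
--     -------
--         List of (start_pos, end_pos, matched_keyword) tuples, sorted by position
--     """
--     matches = []
--     content_lower = content.lower()
--
--     for keyword in keywords: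
--         start = 0
--         while True:
--             pos = content_lower.find(keyword, start)
--             if pos == -1:
--                 break
--             matches.append((pos, pos + len(keyword), keyword))
--             start = pos + 1
--
--     # Sort by position
--     matches.sort(key=lambda x: x[0])
--     return matches
-- ===== SOURCE B (Python) =====
-- def find_keyword_matches(content: str, keywords: list[str]) -> list[tuple[int, int, str]]:
--     """Single left-to-right scan: at each position emit every keyword that
--     starts there (keyword list order breaks ties), so the output is built
--     already sorted by position and no final sort is needed."""
--     content_lower = content.lower()
--     n = len(content_lower)
--     matches = []
--     for pos in range(n + 1):
--         for keyword in keywords: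
--             if content_lower.startswith(keyword, pos):
--                 matches.append((pos, pos + len(keyword), keyword))
--     return matches
-- ===== Notes on version B (the rewrite author's own statement) =====
-- stated objective: alternative
-- what changed: B replaces A's per-keyword repeated str.find scans followed by a stable sort with a single left-to-right scan over positions that tests every keyword at each position, emitting the matches already in sorted order (same position/keyword-order tie-break) with no sort step.
import Mathlib
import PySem

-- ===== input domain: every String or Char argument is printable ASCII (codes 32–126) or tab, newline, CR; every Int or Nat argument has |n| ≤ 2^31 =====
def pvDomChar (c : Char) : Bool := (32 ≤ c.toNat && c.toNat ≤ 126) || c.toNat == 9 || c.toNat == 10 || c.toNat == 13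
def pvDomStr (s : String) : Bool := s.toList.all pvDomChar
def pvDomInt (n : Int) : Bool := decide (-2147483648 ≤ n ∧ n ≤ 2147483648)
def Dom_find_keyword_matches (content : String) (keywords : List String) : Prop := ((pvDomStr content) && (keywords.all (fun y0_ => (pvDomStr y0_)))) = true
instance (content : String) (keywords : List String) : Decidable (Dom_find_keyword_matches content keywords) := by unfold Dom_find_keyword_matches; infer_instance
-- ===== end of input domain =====

-- B replaces A's per-keyword repeated str.find scans plus a final stable sort by a single
-- left-to-right position scan that emits matches already in sorted order (alternative
-- decomposition; not claimed faster).


-- ===== PORT A =====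
-- the `while True:` find/append loop of A for one keyword; fuel bounds the iteration count
-- (each iteration strictly increases `start`, so `cl.length + 2` iterations always suffice)
def pvLoopA (cl kw : List Char) (kstr : String) : Nat → Int → List (Int × Int × String)
  | 0, _ => []
  | fuel+1, start =>
    let pos := PySem.Chars.findFrom cl kw start
    if pos = -1 then []
    else (pos, pos + (kw.length : Int), kstr) :: pvLoopA cl kw kstr fuel (pos + 1)

def find_keyword_matches (content : String) (keywords : List String) : List (Int × Int × String) :=
  let cl := PySem.Chars.lower content.toList
  let ms := keywords.foldl (fun acc kw => acc ++ pvLoopA cl kw.toList kw (cl.length + 2) 0) []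
  PySem.List.sorted ms (fun x => x.1)

-- ===== PORT B =====
def find_keyword_matches_alt (content : String) (keywords : List String) : List (Int × Int × String) :=
  let cl := PySem.Chars.lower content.toList
  (List.range (cl.length + 1)).foldl (fun acc pos =>
    keywords.foldl (fun acc2 kw =>
      if PySem.Chars.startswith (List.drop pos cl) kw.toList
      then acc2 ++ [((pos : Int), (pos : Int) + (kw.toList.length : Int), kw)]
      else acc2) acc) []

-- ===== PRECONDITION & SPEC =====
def Spec_find_keyword_matches (content : String) (keywords : List String) (out : List (Int × Int × String)) : Prop := out = find_keyword_matches_alt content keywords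
instance (content : String) (keywords : List String) (out : List (Int × Int × String)) : Decidable (Spec_find_keyword_matches content keywords out) := by unfold Spec_find_keyword_matches; infer_instance

-- ===== CLAIM (what is proved, stated in full; the proofs are below) =====
def Claim_equal_find_keyword_matches : Prop := ∀ (content : String) (keywords : List String), Dom_find_keyword_matches content keywords → Spec_find_keyword_matches content keywords (find_keyword_matches content keywords)

-- ===== LEMMAS AND PROOFS =====

-- the tuple either port emits for keyword `kstr` (of length L) matched at position p
def pvTup (kstr : String) (L p : Nat) : Int × Int × String := ((p : Int), (p : Int) + (L : Int), kstr)

theorem pvFindFrom_past (s sub : List Char) :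
    PySem.Chars.findFrom s sub ((s.length : Int) + 1) none = -1 := by
  unfold PySem.Chars.findFrom
  have h1 : ¬ ((s.length : Int) + 1 < 0) := by omega
  simp only [h1, if_false]
  rw [if_pos (by omega)]

theorem pvPrefix_drop_infix {kw l : List Char} {k p : Nat} (hkp : k ≤ p)
    (h : kw <+: l.drop p) : kw <:+: l.drop k := by
  have hd : l.drop p = (l.drop k).drop (p - k) := by rw [List.drop_drop]; congr 1; omega
  rw [hd] at h
  exact h.isInfix.trans (List.drop_suffix _ _).isInfix

theorem pvInsertBy_front {α : Type} (before : α → α → Bool) (x : α) (r : List α)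
    (h : ∀ y ∈ r, before x y = true) : PySem.List.insertBy before x r = x :: r := by
  cases r with
  | nil => rfl
  | cons y ys => simp [PySem.List.insertBy, h y (List.mem_cons_self ..)]

theorem pvInsertBy_append_not {α : Type} (before : α → α → Bool) (x : α) (b r : List α)
    (h : ∀ y ∈ b, before x y = false) :
    PySem.List.insertBy before x (b ++ r) = b ++ PySem.List.insertBy before x r := by
  induction b with
  | nil => rfl
  | cons y ys ih =>
    have hy := h y (List.mem_cons_self ..)
    simp [PySem.List.insertBy, hy, ih (fun z hz => h z (List.mem_cons_of_mem _ hz))]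

theorem pvInsert_blocks {α : Type} (key : α → Int) (S : List Int) (processed : List α) (x : α)
    (hS : S.Pairwise (· < ·)) (hx : key x ∈ S) :
    PySem.List.insertBy (fun a b => decide (key a < key b)) x
        (S.flatMap (fun v => processed.filter (fun y => decide (key y = v)))) =
      S.flatMap (fun v => (processed ++ [x]).filter (fun y => decide (key y = v))) := by
  induction S with
  | nil => exact absurd hx (by simp)
  | cons v S' ih =>
    have hvS' : ∀ w ∈ S', v < w := by
      intro w hw; exact (List.pairwise_cons.mp hS).1 w hw
    simp only [List.flatMap_cons]
    by_cases hxv : key x = v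
    · -- x belongs to the first block: skip the block, land in front of the rest
      rw [pvInsertBy_append_not _ _ _ _ (by
        intro y hy
        simp only [List.mem_filter] at hy
        simp [hxv, (by exact_mod_cast of_decide_eq_true hy.2 : key y = v)])]
      rw [pvInsertBy_front _ _ _ (by
        intro y hy
        simp only [List.mem_flatMap, List.mem_filter] at hy
        obtain ⟨w, hw, -, hkey⟩ := hy
        have : key y = w := of_decide_eq_true hkey
        simp [this, hxv]
        exact hvS' w hw)]
      have h1 : (processed ++ [x]).filter (fun y => decide (key y = v)) =
          processed.filter (fun y => decide (key y = v)) ++ [x] := by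
        rw [List.filter_append]; simp [hxv]
      have h2 : ∀ w ∈ S', (processed ++ [x]).filter (fun y => decide (key y = w)) =
          processed.filter (fun y => decide (key y = w)) := by
        intro w hw
        rw [List.filter_append]
        have : key x ≠ w := by have := hvS' w hw; omega
        simp [this]
      rw [h1, List.flatMap_congr h2]
      simp
    · have hx' : key x ∈ S' := by
        rcases List.mem_cons.mp hx with h | h
        · exact absurd h hxv
        · exact h
      have hvx : v < key x := hvS' _ hx'
      rw [pvInsertBy_append_not _ _ _ _ (by
        intro y hy
        simp only [List.mem_filter] at hy
        have : key y = v := of_decide_eq_true hy.2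
        simp [this]; omega)]
      have h1 : (processed ++ [x]).filter (fun y => decide (key y = v)) =
          processed.filter (fun y => decide (key y = v)) := by
        rw [List.filter_append]; simp; omega
      rw [ih (List.pairwise_cons.mp hS).2 hx', h1]

theorem pvFoldl_blocks {α : Type} (key : α → Int) (S : List Int) (hS : S.Pairwise (· < ·)) :
    ∀ (l processed : List α), (∀ x ∈ l, key x ∈ S) →
    List.foldl (fun acc x => PySem.List.insertBy (fun a b => decide (key a < key b)) x acc)
        (S.flatMap (fun v => processed.filter (fun y => decide (key y = v)))) l =
      S.flatMap (fun v => (processed ++ l).filter (fun y => decide (key y = v))) := by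
  intro l
  induction l with
  | nil => intro processed _; simp
  | cons x xs ih =>
    intro processed hmem
    rw [List.foldl_cons, pvInsert_blocks key S processed x hS (hmem x (List.mem_cons_self ..)),
      ih (processed ++ [x]) (fun z hz => hmem z (List.mem_cons_of_mem _ hz))]
    simp

theorem pvSorted_blocks {α : Type} (key : α → Int) (S : List Int) (l : List α)
    (hS : S.Pairwise (· < ·)) (hmem : ∀ x ∈ l, key x ∈ S) :
    PySem.List.sorted l key =
      S.flatMap (fun v => l.filter (fun y => decide (key y = v))) := by
  rw [PySem.List.sorted_eq_foldl_insertBy]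
  have h0 : ([] : List α) = S.flatMap (fun v => ([] : List α).filter (fun y => decide (key y = v))) := by
    simp
  rw [h0, pvFoldl_blocks key S hS l [] hmem]
  simp

theorem pvFlatMap_ite {β : Type} (kws : List String) (g : String → Bool) (f : String → β) :
    kws.flatMap (fun kw => if g kw then [f kw] else []) = (kws.filter g).map f := by
  induction kws with
  | nil => rfl
  | cons k ks ih => by_cases h : g k <;> simp [h, ih]

theorem pvFilter_range_eq (m p : Nat) (q : Nat → Bool) (hp : p < m) :
    (List.range m).filter (fun (j : Nat) => decide ((j : Int) = (p : Int)) && q j) =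
      if q p then [p] else [] := by
  induction m with
  | zero => omega
  | succ m ih =>
    rw [List.range_succ, List.filter_append]
    by_cases hpm : p = m
    · subst hpm
      have h0 : (List.range p).filter (fun (j : Nat) => decide ((j : Int) = (p : Int)) && q j) = [] := by
        rw [List.filter_eq_nil_iff]
        intro a ha
        simp only [List.mem_range] at ha
        simp
        omega
      rw [h0]
      by_cases hq : q p <;> simp [hq]
    · have hp2 : p < m := by omega
      rw [ih hp2]
      have h1 : List.filter (fun (j : Nat) => decide ((j : Int) = (p : Int)) && q j) [m] = [] := by
        simp
        omega
      rw [h1, List.append_nil]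

theorem pvLoopA_eq (cl kw : List Char) (kstr : String) :
    ∀ (fuel k : Nat), k ≤ cl.length + 1 → cl.length + 1 - k ≤ fuel →
    pvLoopA cl kw kstr fuel (k : Int) =
      ((List.range' k (cl.length + 1 - k)).filter
        (fun p => PySem.Chars.startswith (List.drop p cl) kw)).map (pvTup kstr kw.length) := by
  intro fuel
  induction fuel with
  | zero =>
    intro k hk hf
    have : k = cl.length + 1 := by omega
    subst this
    simp [pvLoopA]
  | succ fuel ih =>
    intro k hk hf
    by_cases hk1 : k = cl.length + 1
    · subst hk1
      have hpast := pvFindFrom_past cl kw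
      push_cast at hpast ⊢
      simp [pvLoopA, hpast]
    · have hkle : k ≤ cl.length := by omega
      by_cases hneg : PySem.Chars.findFrom cl kw (k : Int) = -1
      · -- no further match: every position in [k, len] fails
        have hnoinf := (PySem.Chars.findFrom_natCast_eq_neg_one_iff cl kw k hkle).mp hneg
        simp only [pvLoopA, hneg, if_true]
        symm
        rw [List.map_eq_nil_iff, List.filter_eq_nil_iff]
        intro p hp hsw
        have hkp : k ≤ p ∧ p < cl.length + 1 := by
          rcases List.mem_range'.mp hp with ⟨i, hi, rfl⟩; omega
        exact hnoinf (pvPrefix_drop_infix hkp.1 ((PySem.Chars.startswith_iff _ _).mp hsw))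
      · obtain ⟨hge, hpre, hmin⟩ := PySem.Chars.findFrom_natCast_spec cl kw k hkle hneg
        set m := PySem.Chars.findFrom cl kw (k : Int) with hm
        have hm0 : 0 ≤ m := le_trans (by exact_mod_cast Nat.zero_le k) hge
        set mm := m.toNat with hmm
        have hmcast : (mm : Int) = m := Int.toNat_of_nonneg hm0
        have hkmm : k ≤ mm := by omega
        -- mm ≤ cl.length
        have hmmle : mm ≤ cl.length := by
          by_contra hgt
          have hnil : List.drop mm cl = [] := List.drop_eq_nil_of_le (by omega)
          have hkwnil : kw = [] := List.prefix_nil.mp (hnil ▸ hpre)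
          have : ¬ kw <+: List.drop k cl := hmin k le_rfl (by omega)
          exact this (hkwnil ▸ List.nil_prefix)
        -- unfold one loop step
        rw [show pvLoopA cl kw kstr (fuel+1) (k : Int) =
            (m, m + (kw.length : Int), kstr) :: pvLoopA cl kw kstr fuel (m + 1) by
          simp [pvLoopA, hneg, ← hm]]
        -- rewrite the recursive call at mm + 1
        have hstep : m + 1 = ((mm + 1 : Nat) : Int) := by omega
        rw [hstep, ih (mm + 1) (by omega) (by omega)]
        rw [show cl.length + 1 - (mm + 1) = cl.length - mm by omega]
        -- split the range at mm
        have hsplit : List.range' k (cl.length + 1 - k) =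
            List.range' k (mm - k) ++ mm :: List.range' (mm + 1) (cl.length - mm) := by
          have h1 : List.range' k (mm - k) ++ List.range' (k + 1 * (mm - k)) (cl.length + 1 - mm) =
              List.range' k ((mm - k) + (cl.length + 1 - mm)) := List.range'_append
          have e1 : k + 1 * (mm - k) = mm := by omega
          have e2 : (mm - k) + (cl.length + 1 - mm) = cl.length + 1 - k := by omega
          rw [e1, e2] at h1
          rw [← h1]
          congr 1
          have : cl.length + 1 - mm = (cl.length - mm) + 1 := by omega
          rw [this, List.range'_succ]
        rw [hsplit, List.filter_append, List.filter_cons]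
        have hfail : (List.range' k (mm - k)).filter
            (fun p => PySem.Chars.startswith (List.drop p cl) kw) = [] := by
          rw [List.filter_eq_nil_iff]
          intro p hp hsw
          rcases List.mem_range'.mp hp with ⟨i, hi, rfl⟩
          exact hmin (k + 1 * i) (by omega) (by omega) ((PySem.Chars.startswith_iff _ _).mp hsw)
        have hhit : PySem.Chars.startswith (List.drop mm cl) kw = true :=
          (PySem.Chars.startswith_iff _ _).mpr hpre
        rw [hfail, hhit]
        simp only [List.nil_append]
        congr 1
        simp [pvTup, hmcast]

-- ===== VERDICT (by name: the statement is the Claim_ definition above) =====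
theorem find_keyword_matches_spec : Claim_equal_find_keyword_matches := by
  intro content keywords _
  unfold Spec_find_keyword_matches find_keyword_matches find_keyword_matches_alt
  set cl := PySem.Chars.lower content.toList with hcl
  simp only [PySem.List.foldl_append_eq_flatMap, List.nil_append, PySem.List.foldl_append_if]
  -- A's per-keyword loop results
  have hA : ∀ kw : String, pvLoopA cl kw.toList kw (cl.length + 2) 0 =
      ((List.range (cl.length + 1)).filter
        (fun p => PySem.Chars.startswith (List.drop p cl) kw.toList)).map (pvTup kw kw.toList.length) := by
    intro kw
    have h := pvLoopA_eq cl kw.toList kw (cl.length + 2) 0 (by omega) (by omega)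
    rw [List.range_eq_range']
    simpa using h
  simp only [hA]
  -- stable sort as concatenation of position blocks
  set M := keywords.flatMap (fun kw =>
      ((List.range (cl.length + 1)).filter
        (fun p => PySem.Chars.startswith (List.drop p cl) kw.toList)).map (pvTup kw kw.toList.length)) with hM
  have hS : ((List.range (cl.length + 1)).map Int.ofNat).Pairwise (· < ·) := by
    rw [List.pairwise_map]
    exact List.pairwise_lt_range.imp (fun h => Int.ofNat_lt.mpr h)
  have hmem : ∀ x ∈ M, (fun y : Int × Int × String => y.1) x ∈
      (List.range (cl.length + 1)).map Int.ofNat := by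
    intro x hx
    rw [hM] at hx
    simp only [List.mem_flatMap, List.mem_map, List.mem_filter, List.mem_range] at hx
    obtain ⟨kw, _, p, ⟨hp, _⟩, rfl⟩ := hx
    exact List.mem_map.mpr ⟨p, List.mem_range.mpr hp, by simp [pvTup]⟩
  rw [pvSorted_blocks _ _ M hS hmem, List.flatMap_map]
  simp only [Int.ofNat_eq_natCast]
  apply List.flatMap_congr
  intro p hp
  have hplt : p < cl.length + 1 := List.mem_range.mp hp
  rw [hM, List.filter_flatMap]
  have hper : ∀ kw ∈ keywords,
      List.filter (fun y => decide (y.1 = (p : Int)))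
        (((List.range (cl.length + 1)).filter
          (fun q => PySem.Chars.startswith (List.drop q cl) kw.toList)).map (pvTup kw kw.toList.length)) =
      if PySem.Chars.startswith (List.drop p cl) kw.toList
      then [pvTup kw kw.toList.length p] else [] := by
    intro kw _
    rw [List.filter_map, List.filter_filter]
    rw [show (fun a => ((fun y : Int × Int × String => decide (y.1 = (p : Int))) ∘ pvTup kw kw.toList.length) a
        && (fun q => PySem.Chars.startswith (List.drop q cl) kw.toList) a) =
        (fun (j : Nat) => decide ((j : Int) = (p : Int)) && PySem.Chars.startswith (List.drop j cl) kw.toList) by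
      funext j; simp [pvTup]]
    rw [pvFilter_range_eq (cl.length + 1) p _ hplt]
    by_cases h : PySem.Chars.startswith (List.drop p cl) kw.toList <;> simp [h]
  rw [List.flatMap_congr hper, pvFlatMap_ite keywords _ (fun kw => pvTup kw kw.toList.length p)]
  simp [pvTup]
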